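-- pv_equiv track=rewrite | github.com/NDonatucci/donut_tests | sp800_22_non_overlapping_template_matching_test.py | countBlockAppearances3
-- ===== SOURCE A (Python) =====
-- import math
--
-- def countBlockAppearances3(arr, pattern):
--     count = [0,0,0,0]
--     a = math.floor(len(arr)/2)
--     for i in range(a):
--         l = arr[i*2]
--         r = arr[i*2 + 1]
--         if l == 0 and r == 0:
--             count[0]=count[0]+1
--         elif l==0 and r==1:
--             count[1]=count[1]+1
--         elif l==1 and r==0:
--             count[2]=count[2]+1
--         else:
--             count[3]=count[3]+1
--     return count
-- ===== SOURCE B (Python) =====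
-- def countBlockAppearances3(arr, pattern):
--     a = len(arr) // 2
--     pairs = [(arr[2 * i], arr[2 * i + 1]) for i in range(a)]
--     c0 = pairs.count((0, 0))
--     c1 = pairs.count((0, 1))
--     c2 = pairs.count((1, 0))
--     return [c0, c1, c2, a - c0 - c1 - c2]
-- ===== Notes on version B (the rewrite author's own statement) =====
-- stated objective: alternative
-- what changed: B builds the list of adjacent pairs once and reads the first three counters off it with list.count, deriving the catch-all fourth counter by subtraction, instead of A's single fold with a four-way branch updating a mutable counter array.
import Mathlib
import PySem

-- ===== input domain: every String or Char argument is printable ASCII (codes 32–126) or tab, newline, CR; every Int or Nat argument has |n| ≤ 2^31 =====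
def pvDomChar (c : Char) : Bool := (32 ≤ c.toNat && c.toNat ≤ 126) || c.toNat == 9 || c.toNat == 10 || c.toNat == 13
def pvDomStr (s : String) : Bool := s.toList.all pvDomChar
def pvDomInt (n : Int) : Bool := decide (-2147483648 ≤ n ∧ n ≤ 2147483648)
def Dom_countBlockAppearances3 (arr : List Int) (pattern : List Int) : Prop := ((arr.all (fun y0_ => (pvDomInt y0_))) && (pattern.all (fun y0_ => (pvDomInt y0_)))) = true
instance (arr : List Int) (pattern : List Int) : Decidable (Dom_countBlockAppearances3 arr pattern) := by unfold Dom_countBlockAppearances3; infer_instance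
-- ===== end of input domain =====

-- B counts adjacent pairs on a pair list built once (list.count + subtraction for the
-- catch-all fourth bucket) instead of A's branching fold over a counter array; objective: alternative.

-- ===== PORT A =====
-- loop body of A; the counter list count[0..3] is kept as a 4-tuple; indices i*2, i*2+1
-- are always in range for i < a = len(arr)//2, so the pyGetD default 0 is never used
def pvStep (arr : List Int) (c : Int × Int × Int × Int) (i : Int) : Int × Int × Int × Int :=
  let l := PySem.List.pyGetD arr (i * 2) 0
  let r := PySem.List.pyGetD arr (i * 2 + 1) 0
  if l = 0 ∧ r = 0 then (c.1 + 1, c.2.1, c.2.2.1, c.2.2.2)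
  else if l = 0 ∧ r = 1 then (c.1, c.2.1 + 1, c.2.2.1, c.2.2.2)
  else if l = 1 ∧ r = 0 then (c.1, c.2.1, c.2.2.1 + 1, c.2.2.2)
  else (c.1, c.2.1, c.2.2.1, c.2.2.2 + 1)

def countBlockAppearances3 (arr : List Int) (pattern : List Int) : List Int :=
  let a : Int := (arr.length : Int) / 2
  let c := (PySem.List.pyRange 0 a 1).foldl (pvStep arr) (0, 0, 0, 0)
  [c.1, c.2.1, c.2.2.1, c.2.2.2]

-- ===== PORT B =====
-- the pair (arr[2*i], arr[2*i+1]); indices always in range for i < a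
def pvPair (arr : List Int) (i : Nat) : Int × Int :=
  (PySem.List.pyGetD arr (2 * (i : Int)) 0, PySem.List.pyGetD arr (2 * (i : Int) + 1) 0)

def countBlockAppearances3_alt (arr : List Int) (pattern : List Int) : List Int :=
  let a := arr.length / 2
  let pairs := (List.range a).map (pvPair arr)
  let c0 : Int := pairs.count ((0 : Int), (0 : Int))
  let c1 : Int := pairs.count ((0 : Int), (1 : Int))
  let c2 : Int := pairs.count ((1 : Int), (0 : Int))
  [c0, c1, c2, (a : Int) - c0 - c1 - c2]

-- ===== PRECONDITION & SPEC =====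
def Spec_countBlockAppearances3 (arr : List Int) (pattern : List Int) (out : List Int) : Prop := out = countBlockAppearances3_alt arr pattern
instance (arr : List Int) (pattern : List Int) (out : List Int) : Decidable (Spec_countBlockAppearances3 arr pattern out) := by unfold Spec_countBlockAppearances3; infer_instance

-- ===== CLAIM (what is proved, stated in full; the proofs are below) =====
def Claim_equal_countBlockAppearances3 : Prop := ∀ (arr : List Int) (pattern : List Int), Dom_countBlockAppearances3 arr pattern → Spec_countBlockAppearances3 arr pattern (countBlockAppearances3 arr pattern)

-- ===== LEMMAS AND PROOFS =====

def pvPairs (arr : List Int) (n : Nat) : List (Int × Int) :=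
  (List.range n).map (pvPair arr)

theorem pvLoopInv (arr : List Int) (n : Nat) :
    (PySem.List.pyRange 0 (n : Int) 1).foldl (pvStep arr) (0, 0, 0, 0) =
      (((pvPairs arr n).count ((0 : Int), (0 : Int)) : Int),
       ((pvPairs arr n).count ((0 : Int), (1 : Int)) : Int),
       ((pvPairs arr n).count ((1 : Int), (0 : Int)) : Int),
       (n : Int) - ((pvPairs arr n).count ((0 : Int), (0 : Int)) : Int)
         - ((pvPairs arr n).count ((0 : Int), (1 : Int)) : Int)
         - ((pvPairs arr n).count ((1 : Int), (0 : Int)) : Int)) := by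
  induction n with
  | zero => rfl
  | succ n ih =>
    have hr : PySem.List.pyRange 0 ((n + 1 : Nat) : Int) 1 =
        PySem.List.pyRange 0 (n : Int) 1 ++ [(n : Int)] := by
      have h := PySem.List.pyRange_one_succ_right (a := 0) (b := (n : Int)) (by positivity)
      push_cast
      exact h
    rw [hr, List.foldl_append, List.foldl_cons, List.foldl_nil, ih]
    have hpairs : pvPairs arr (n + 1) = pvPairs arr n ++ [pvPair arr n] := by
      simp [pvPairs, List.range_succ]
    rw [hpairs]
    simp only [List.count_append, List.count_singleton]
    unfold pvStep
    have h2 : (n : Int) * 2 = 2 * (n : Int) := by ring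
    rw [h2]
    have hp : pvPair arr n =
        (PySem.List.pyGetD arr (2 * (n : Int)) 0, PySem.List.pyGetD arr (2 * (n : Int) + 1) 0) := rfl
    set l := PySem.List.pyGetD arr (2 * (n : Int)) 0 with hl
    set r := PySem.List.pyGetD arr (2 * (n : Int) + 1) 0 with hr2
    by_cases h00 : l = 0 ∧ r = 0
    · simp [hp, h00, Prod.ext_iff, beq_iff_eq]
    · by_cases h01 : l = 0 ∧ r = 1
      · have e00 : ((l, r) == ((0 : Int), (0 : Int))) = false := by
          simp [Prod.ext_iff]; intro hl0; rcases h01 with ⟨_, hr1⟩; omega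
        simp [hp, h01, Prod.ext_iff, beq_iff_eq]
        ring
      · by_cases h10 : l = 1 ∧ r = 0
        · have e00 : ((l, r) == ((0 : Int), (0 : Int))) = false := by
            simp [Prod.ext_iff]; intro hl0; rcases h10 with ⟨hl1, _⟩; omega
          have e01 : ((l, r) == ((0 : Int), (1 : Int))) = false := by
            simp [Prod.ext_iff]; intro hl0; rcases h10 with ⟨hl1, _⟩; omega
          simp [hp, h10, Prod.ext_iff, beq_iff_eq]
          ring
        · have e00 : ((l, r) == ((0 : Int), (0 : Int))) = false := by
            simp [Prod.ext_iff]; tauto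
          have e01 : ((l, r) == ((0 : Int), (1 : Int))) = false := by
            simp [Prod.ext_iff]; tauto
          have e10 : ((l, r) == ((1 : Int), (0 : Int))) = false := by
            simp [Prod.ext_iff]; tauto
          simp [hp, h00, h01, h10, e00, e01, e10]
          ring

-- ===== VERDICT (by name: the statement is the Claim_ definition above) =====
theorem countBlockAppearances3_spec : Claim_equal_countBlockAppearances3 := by
  intro arr pattern _
  have ha : ((arr.length : Int)) / 2 = ((arr.length / 2 : Nat) : Int) := by omega
  unfold Spec_countBlockAppearances3
  simp only [countBlockAppearances3, countBlockAppearances3_alt, ha,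
    pvLoopInv arr (arr.length / 2), pvPairs]
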